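-- pv_equiv track=rewrite | github.com/AICLOUDK/string | non_shared_substring.py | find_shortest_non_shared_substring
-- ===== SOURCE A (Python) =====
-- def find_shortest_non_shared_substring(a, b):
--     H = len(a)
--     for l in range(1, H + 1):
--         for C in range(H - l + 1):
--             substring = a[C:C + l]
--             if substring not in b:
--                 return substring
--     return ""
-- ===== SOURCE B (Python) =====
-- def find_shortest_non_shared_substring(a, b):
--     # Suffix-LCP dynamic programming: match_len[C] = length of the longest prefix of
--     # a[C:] that occurs in b, via lcp(C, j) = 1 + lcp(C+1, j+1) when a[C] == b[j]
--     # (rows computed bottom-up, keeping only the previous row).  The shortest absent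
--     # substring starting at C is then a[C:C+match_len[C]+1] (when it fits); keep the
--     # shortest such candidate, earliest on ties.
--     H, N = len(a), len(b)
--     prev = [0] * (N + 1)
--     match_len = [0] * H
--     for C in range(H - 1, -1, -1):
--         cur = [prev[j + 1] + 1 if a[C] == b[j] else 0 for j in range(N)]
--         match_len[C] = max(cur, default=0)
--         cur.append(0)
--         prev = cur
--     best = None
--     for C in range(H):
--         m = match_len[C]
--         if C + m < H and (best is None or m + 1 < best[0]):
--             best = (m + 1, C)
--     return a[best[1]:best[1] + best[0]] if best else ""
-- ===== Notes on version B (the rewrite author's own statement) =====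
-- stated objective: faster
-- what changed: Replaces A's length-by-length scan of a's substrings (each tested with a full 'in b' text search) by suffix-LCP dynamic programming: match_len[C], the longest prefix of a[C:] occurring in b, is computed bottom-up from lcp(C,j) = 1 + lcp(C+1,j+1) when a[C]==b[j], and the answer is the shortest candidate a[C:C+match_len[C]+1], earliest on ties.
import Mathlib
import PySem

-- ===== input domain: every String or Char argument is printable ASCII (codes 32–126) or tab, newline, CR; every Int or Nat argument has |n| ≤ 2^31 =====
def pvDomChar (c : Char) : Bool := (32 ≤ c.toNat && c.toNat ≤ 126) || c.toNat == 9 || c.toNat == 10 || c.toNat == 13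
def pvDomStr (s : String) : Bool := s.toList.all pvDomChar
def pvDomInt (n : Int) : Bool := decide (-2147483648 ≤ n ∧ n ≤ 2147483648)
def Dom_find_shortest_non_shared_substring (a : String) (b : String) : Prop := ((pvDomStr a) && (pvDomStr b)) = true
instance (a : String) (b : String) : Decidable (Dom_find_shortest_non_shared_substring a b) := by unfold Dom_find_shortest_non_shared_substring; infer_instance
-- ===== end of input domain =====

-- B replaces A's length-by-length substring scan by suffix-LCP dynamic programming:
-- match_len[C] (longest prefix of a[C:] occurring in b) is computed bottom-up from the
-- recurrence lcp(C,j) = 1 + lcp(C+1,j+1) when a[C] = b[j], and the answer is the shortest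
-- candidate a[C:C+match_len[C]+1] (earliest on ties). Both programs are total; equality on all of Dom.

-- ===== PORT A =====
-- inner loop: 'for C in range(H - l + 1): … if substring not in b: return substring'
def pvA_inner (al bl : List Char) (l : Int) : Option (List Char) :=
  (PySem.List.pyRange 0 ((al.length : Int) - l + 1) 1).foldl
    (fun acc C =>
      match acc with
      | some r => some r
      | none =>
        let substring := PySem.List.slice al (some C) (some (C + l))
        if PySem.Chars.isIn substring bl then none else some substring)
    none

def find_shortest_non_shared_substring (a : String) (b : String) : String :=
  let al := a.toList
  let bl := b.toList
  match (PySem.List.pyRange 1 ((al.length : Int) + 1) 1).foldl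
      (fun acc l =>
        match acc with
        | some r => some r
        | none => pvA_inner al bl l)
      none with
  | some r => String.ofList r
  | none => ""

-- ===== PORT B =====
-- the DP loop 'for C in range(H-1, -1, -1): cur = [...]; match_len[C] = max(cur, default=0);
-- cur.append(0); prev = cur', as the structural recursion on a's suffixes (C descending);
-- returns (prev, match_len)
def pvB_rows (bl : List Char) : List Char → List Nat × List Nat
  | [] => (List.replicate (bl.length + 1) 0, [])
  | x :: al' =>
    let pm := pvB_rows bl al'
    let cur := (List.range bl.length).map
      (fun j => if x = bl.getD j x then pm.1.getD (j + 1) 0 + 1 else 0)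
    let m := PySem.List.maxD cur (fun y => y) 0
    (cur ++ [0], m :: pm.2)

-- 'if C + m < H and (best is None or m + 1 < best[0]): best = (m + 1, C)'
def pvB_step (H : Int) (mOf : Int → Int) (best : Option (Int × Int)) (C : Int) :
    Option (Int × Int) :=
  let m := mOf C
  if C + m < H then
    match best with
    | none => some (m + 1, C)
    | some (s, c) => if m + 1 < s then some (m + 1, C) else some (s, c)
  else best

def find_shortest_non_shared_substring_alt (a : String) (b : String) : String :=
  let al := a.toList
  let bl := b.toList
  let match_len := (pvB_rows bl al).2
  match (PySem.List.pyRange 0 (al.length : Int) 1).foldl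
      (pvB_step (al.length : Int) (fun C => (match_len.getD C.toNat 0 : Int))) none with
  | none => ""
  | some (s, c) => String.ofList (PySem.List.slice al (some c) (some (c + s)))

-- ===== PRECONDITION & SPEC =====
def Spec_find_shortest_non_shared_substring (a : String) (b : String) (out : String) : Prop := out = find_shortest_non_shared_substring_alt a b
instance (a : String) (b : String) (out : String) : Decidable (Spec_find_shortest_non_shared_substring a b out) := by unfold Spec_find_shortest_non_shared_substring; infer_instance

-- ===== CLAIM (what is proved, stated in full; the proofs are below) =====
def Claim_equal_find_shortest_non_shared_substring : Prop := ∀ (a : String) (b : String), Dom_find_shortest_non_shared_substring a b → Spec_find_shortest_non_shared_substring a b (find_shortest_non_shared_substring a b)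

-- ===== LEMMAS AND PROOFS =====

-- ---- generic fold/find shapes ----

-- A's early-return loop (option accumulator) is findSome?
theorem pv_foldl_some {α β : Type} (xs : List α)
    (f : Option β → α → Option β) (hsome : ∀ r x, f (some r) x = some r) (r : β) :
    xs.foldl f (some r) = some r := by
  induction xs with
  | nil => rfl
  | cons x xs ih => simpa [hsome] using ih

theorem pv_foldl_eq_findSome? {α β : Type} (xs : List α)
    (f : Option β → α → Option β) (g : α → Option β)
    (hsome : ∀ r x, f (some r) x = some r) (hnone : ∀ x, f none x = g x) :
    xs.foldl f none = xs.findSome? g := by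
  induction xs with
  | nil => rfl
  | cons x xs ih =>
    simp only [List.foldl_cons, List.findSome?_cons, hnone]
    cases h : g x with
    | none => simpa [h] using ih
    | some r => simpa [h] using pv_foldl_some xs f hsome r

-- an 'if p then none else some (f x)' search is find? of ¬p, mapped
theorem pv_findSome?_ite {α β : Type} (xs : List α) (p : α → Bool) (f : α → β) :
    xs.findSome? (fun x => if p x then none else some (f x))
      = (xs.find? (fun x => !p x)).map f := by
  induction xs with
  | nil => rfl
  | cons x xs ih =>
    by_cases h : p x <;> simp [h, ih]

-- ---- the spec quantity m(C): longest match of a[C:] inside b ----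
-- longest common prefix of two suffixes (the quantity the DP rows tabulate)
def pvLcp : List Char → List Char → Nat
  | x :: u, y :: v => if x = y then pvLcp u v + 1 else 0
  | _, _ => 0

def pvM (al bl : List Char) (C : Nat) : Nat :=
  (List.range bl.length).foldl (fun m j => max m (pvLcp (al.drop C) (bl.drop j))) 0

theorem pvLcp_ge_iff (l : Nat) (u v : List Char) :
    l ≤ pvLcp u v ↔ l ≤ u.length ∧ l ≤ v.length ∧ u.take l = v.take l := by
  induction u generalizing v l with
  | nil => cases l <;> simp [pvLcp]
  | cons x u ih =>
    cases v with
    | nil => cases l <;> simp [pvLcp]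
    | cons y v =>
      cases l with
      | zero => simp
      | succ l =>
        by_cases hxy : x = y
        · subst hxy
          simp [pvLcp, ih]
        · simp [pvLcp, hxy]

theorem pvM_eq_foldl_max (al bl : List Char) (C : Nat) :
    pvM al bl C = ((List.range bl.length).map (fun j => pvLcp (al.drop C) (bl.drop j))).foldl max 0 := by
  rw [List.foldl_map]; rfl

-- 'a[C:C+l] in b' for 1 ≤ l, C + l ≤ len a is exactly l ≤ m(C)
theorem pv_isIn_iff_le_m (al bl : List Char) (C l : Nat)
    (hl : 1 ≤ l) (hfit : C + l ≤ al.length) :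
    PySem.Chars.isIn ((al.drop C).take l) bl = true ↔ l ≤ pvM al bl C := by
  have hsubl : ((al.drop C).take l).length = l := by
    simp only [List.length_take, List.length_drop]; omega
  constructor
  · intro h
    obtain ⟨j, hpre⟩ := (PySem.Chars.exists_prefix_drop_iff_isIn _ bl).mpr h
    have hlen : l ≤ (bl.drop j).length := by
      have := hpre.length_le; omega
    have hjN : j < bl.length := by
      simp only [List.length_drop] at hlen; omega
    have heq : (al.drop C).take l = (bl.drop j).take l := by
      have := List.prefix_iff_eq_take.mp hpre
      rwa [hsubl] at this
    have hlcp : l ≤ pvLcp (al.drop C) (bl.drop j) :=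
      (pvLcp_ge_iff l _ _).mpr ⟨by simp only [List.length_drop]; omega, hlen, heq⟩
    exact le_trans hlcp
      ((PySem.List.le_foldl_max_nat (List.range bl.length)
        (fun j => pvLcp (al.drop C) (bl.drop j)) 0).2 j (List.mem_range.mpr hjN))
  · intro h
    rw [pvM_eq_foldl_max] at h
    rcases PySem.List.foldl_max_mem
        ((List.range bl.length).map (fun j => pvLcp (al.drop C) (bl.drop j))) 0 with h0 | hmem
    · omega
    · obtain ⟨j, _, hj⟩ := List.mem_map.mp hmem
      rw [← hj] at h
      obtain ⟨_, hlen, heq⟩ := (pvLcp_ge_iff l _ _).mp h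
      refine (PySem.Chars.exists_prefix_drop_iff_isIn _ bl).mp ⟨j, ?_⟩
      rw [List.prefix_iff_eq_take, hsubl, heq]

-- ---- window slices ----
theorem pv_slice_window {cs : List Char} {i l : Int} (h0 : 0 ≤ i) (hl : 0 ≤ l) :
    PySem.List.slice cs (some i) (some (i + l)) = (cs.drop i.toNat).take l.toNat := by
  have hs := PySem.List.slice_toNat cs h0 (by omega : 0 ≤ i + l)
  rw [hs]
  congr 1
  omega

-- ---- B's fold computes the lex-least (s(C), C) over valid C ----
def pvValid (al bl : List Char) (C : Nat) : Prop := C + pvM al bl C < al.length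

def pvS (al bl : List Char) (C : Nat) : Nat := pvM al bl C + 1

def pvInv (al bl : List Char) (n : Nat) (r : Option (Int × Int)) : Prop :=
  (r = none ∧ ∀ C < n, ¬ pvValid al bl C) ∨
  (∃ C0 < n, r = some ((pvS al bl C0 : Int), (C0 : Int)) ∧ pvValid al bl C0 ∧
    (∀ C < n, pvValid al bl C → pvS al bl C0 ≤ pvS al bl C) ∧
    (∀ C < C0, pvValid al bl C → pvS al bl C0 < pvS al bl C))

-- max(cur, default=0) over a Nat list is the running max
theorem pv_maxD_eq_foldl (xs : List Nat) :
    PySem.List.maxD xs (fun y => y) 0 = xs.foldl max 0 := by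
  simp only [PySem.List.maxD]
  cases xs with
  | nil => rfl
  | cons x t =>
    rw [PySem.List.max?_id_cons]
    simp only [Option.getD_some, List.foldl_cons, Nat.zero_max]

-- the DP rows tabulate exactly pvLcp of the suffixes, and match_len[C] is pvM
theorem pvB_rows_spec (bl : List Char) (al : List Char) :
    (pvB_rows bl al).1 = (List.range (bl.length + 1)).map (fun j => pvLcp al (bl.drop j)) ∧
    (pvB_rows bl al).2 = (List.range al.length).map (fun C => pvM al bl C) := by
  induction al with
  | nil =>
    constructor
    · refine (List.eq_replicate_iff.mpr ⟨by simp, ?_⟩).symm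
      intro v hv
      obtain ⟨j, _, hj⟩ := List.mem_map.mp hv
      rw [← hj]
      cases bl.drop j <;> rfl
    · rfl
  | cons x al' ih =>
    have hcur : (List.range bl.length).map
        (fun j => if x = bl.getD j x then (pvB_rows bl al').1.getD (j + 1) 0 + 1 else 0)
        = (List.range bl.length).map (fun j => pvLcp (x :: al') (bl.drop j)) := by
      apply List.map_congr_left
      intro j hj
      rw [List.mem_range] at hj
      rw [ih.1, PySem.List.getD_map_range _ _ _ _ (by omega)]
      rw [List.getD_eq_getElem bl x hj]
      rw [List.drop_eq_getElem_cons hj]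
      simp only [pvLcp]
    constructor
    · show (List.range bl.length).map _ ++ [0] = _
      rw [hcur]
      rw [List.range_succ, List.map_append]
      congr 1
      simp only [List.map_cons, List.map_nil]
      congr 1
      rw [List.drop_length]
      rfl
    · show PySem.List.maxD _ (fun y => y) 0 :: (pvB_rows bl al').2 = _
      rw [hcur, pv_maxD_eq_foldl, ih.2]
      rw [List.length_cons, List.range_succ_eq_map, List.map_cons, List.map_map]
      congr 1
      rw [List.foldl_map]
      rfl

-- match_len[C] = m(C) on every in-range C
theorem pvB_mlen_eq (al bl : List Char) (C : Nat) (hC : C < al.length) :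
    (pvB_rows bl al).2.getD C 0 = pvM al bl C := by
  rw [(pvB_rows_spec bl al).2, PySem.List.getD_map_range _ _ _ _ hC]

theorem pvB_fold_inv_aux (al bl : List Char) (n : Nat) (hn : n ≤ al.length) :
    pvInv al bl n
      ((List.range n).foldl
        (fun best (k : Nat) => pvB_step (al.length : Int)
          (fun C => ((pvB_rows bl al).2.getD C.toNat 0 : Int)) best (k : Int)) none) := by
  induction n with
  | zero => exact Or.inl ⟨rfl, by omega⟩
  | succ n ih =>
    have ih := ih (by omega)
    rw [List.range_succ, List.foldl_append, List.foldl_cons, List.foldl_nil]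
    set r := (List.range n).foldl
        (fun best (k : Nat) => pvB_step (al.length : Int)
          (fun C => ((pvB_rows bl al).2.getD C.toNat 0 : Int)) best (k : Int)) none with hr
    unfold pvB_step
    dsimp only
    rw [show ((n : Int)).toNat = n from Int.toNat_natCast n,
      pvB_mlen_eq al bl n (by omega)]
    by_cases hv : n + pvM al bl n < al.length
    · rw [if_pos (by exact_mod_cast hv)]
      rcases ih with ⟨hnone, hall⟩ | ⟨C0, hC0n, hreq, hval, hmin, hstrict⟩
      · rw [hnone]
        refine Or.inr ⟨n, by omega, by simp [pvS], hv, ?_, ?_⟩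
        · intro C hC hvC
          rcases Nat.lt_succ_iff_lt_or_eq.mp hC with h | h
          · exact absurd hvC (hall C h)
          · subst h; exact le_rfl
        · intro C hC hvC
          exact absurd hvC (hall C hC)
      · rw [hreq]
        dsimp only
        by_cases hlt : pvM al bl n + 1 < pvS al bl C0
        · rw [if_pos (by push_cast [pvS] at hlt ⊢; omega)]
          refine Or.inr ⟨n, by omega, by simp [pvS], hv, ?_, ?_⟩
          · intro C hC hvC
            rcases Nat.lt_succ_iff_lt_or_eq.mp hC with h | h
            · have := hmin C h hvC
              simp only [pvS] at *; omega
            · subst h; exact le_rfl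
          · intro C hC hvC
            have := hmin C (by omega) hvC
            simp only [pvS] at *; omega
        · rw [if_neg (by push_cast [pvS] at hlt ⊢; omega)]
          refine Or.inr ⟨C0, by omega, rfl, hval, ?_, hstrict⟩
          intro C hC hvC
          rcases Nat.lt_succ_iff_lt_or_eq.mp hC with h | h
          · exact hmin C h hvC
          · subst h; simp only [pvS] at *; omega
    · rw [if_neg (by exact_mod_cast hv)]
      rcases ih with ⟨hnone, hall⟩ | ⟨C0, hC0n, hreq, hval, hmin, hstrict⟩
      · refine Or.inl ⟨hnone, ?_⟩
        intro C hC
        rcases Nat.lt_succ_iff_lt_or_eq.mp hC with h | h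
        · exact hall C h
        · subst h; exact hv
      · refine Or.inr ⟨C0, by omega, hreq, hval, ?_, hstrict⟩
        intro C hC hvC
        rcases Nat.lt_succ_iff_lt_or_eq.mp hC with h | h
        · exact hmin C h hvC
        · subst h; exact absurd hvC hv

theorem pvB_fold_inv (al bl : List Char) :
    pvInv al bl al.length
      ((PySem.List.pyRange 0 (al.length : Int) 1).foldl
        (pvB_step (al.length : Int)
          (fun C => ((pvB_rows bl al).2.getD C.toNat 0 : Int))) none) := by
  rw [PySem.List.pyRange_one, List.foldl_map]
  have h0 : (((al.length : Int)) - 0).toNat = al.length := by omega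
  rw [h0]
  simp only [zero_add]
  exact pvB_fold_inv_aux al bl al.length le_rfl

-- ---- A's search characterized ----
theorem pv_find?_congr_mem {α : Type} (xs : List α) (p q : α → Bool)
    (h : ∀ x ∈ xs, p x = q x) : xs.find? p = xs.find? q := by
  induction xs with
  | nil => rfl
  | cons x xs ih =>
    simp only [List.find?_cons, h x (by simp)]
    cases q x <;> simp_all

theorem pvA_inner_char (al bl : List Char) (l : Int) (h1 : 1 ≤ l) (hH : l ≤ (al.length : Int)) :
    pvA_inner al bl l =
      ((PySem.List.pyRange 0 ((al.length : Int) - l + 1) 1).find?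
        (fun C => decide ((pvS al bl C.toNat : Int) ≤ l))).map
      (fun C => (al.drop C.toNat).take l.toNat) := by
  unfold pvA_inner
  rw [pv_foldl_eq_findSome? _ _
      (fun C => if PySem.Chars.isIn (PySem.List.slice al (some C) (some (C + l))) bl then none
                else some (PySem.List.slice al (some C) (some (C + l))))
      (fun r x => rfl) (fun x => rfl),
    pv_findSome?_ite]
  rw [pv_find?_congr_mem _ _ (fun C => decide ((pvS al bl C.toNat : Int) ≤ l)) ?_]
  · rcases hf : (PySem.List.pyRange 0 ((al.length : Int) - l + 1) 1).find?
        (fun C => decide ((pvS al bl C.toNat : Int) ≤ l)) with _ | C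
    · rw [hf]; rfl
    · rw [hf]
      have hmem := List.mem_of_find?_eq_some hf
      rw [PySem.List.mem_pyRange_one] at hmem
      simp only [Option.map_some]
      rw [pv_slice_window hmem.1 (by omega)]
  · intro C hC
    rw [PySem.List.mem_pyRange_one] at hC
    rw [pv_slice_window hC.1 (by omega)]
    have hiff := pv_isIn_iff_le_m al bl C.toNat l.toNat (by omega) (by omega)
    by_cases hin : l.toNat ≤ pvM al bl C.toNat
    · rw [hiff.mpr hin]
      simp only [Bool.not_true]
      symm
      rw [decide_eq_false_iff_not]
      simp only [pvS]
      push_cast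
      omega
    · have hfalse : PySem.Chars.isIn ((al.drop C.toNat).take l.toNat) bl = false := by
        rcases hb : PySem.Chars.isIn ((al.drop C.toNat).take l.toNat) bl with _ | _
        · rfl
        · exact absurd (hiff.mp hb) hin
      rw [hfalse]
      simp only [Bool.not_false]
      symm
      rw [decide_eq_true_eq]
      simp only [pvS]
      push_cast
      omega

-- A's whole nested search, when no start position has an absent substring, finds nothing
theorem pvA_result_none (al bl : List Char)
    (hall : ∀ C < al.length, ¬ pvValid al bl C) :
    (PySem.List.pyRange 1 ((al.length : Int) + 1) 1).foldl
      (fun acc l => match acc with | some r => some r | none => pvA_inner al bl l) none = none := by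
  rw [pv_foldl_eq_findSome? _ _ (fun l => pvA_inner al bl l) (fun r x => rfl) (fun x => rfl)]
  rw [List.findSome?_eq_none_iff]
  intro l hl
  rw [PySem.List.mem_pyRange_one] at hl
  rw [pvA_inner_char al bl l (by omega) (by omega)]
  rw [List.find?_eq_none.mpr ?_]
  · rfl
  · intro C hC
    rw [PySem.List.mem_pyRange_one] at hC
    simp only [decide_eq_true_eq, not_le]
    by_contra hsl
    push Not at hsl
    have hvalid : pvValid al bl C.toNat := by
      simp only [pvValid, pvS] at hsl ⊢
      omega
    exact hall C.toNat (by simp only [pvValid] at hvalid; omega) hvalid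

-- A's whole nested search returns the window at the lex-least (s(C), C)
theorem pvA_result_some (al bl : List Char) (C0 : Nat)
    (hval : pvValid al bl C0)
    (hmin : ∀ C < al.length, pvValid al bl C → pvS al bl C0 ≤ pvS al bl C)
    (hstrict : ∀ C < C0, pvValid al bl C → pvS al bl C0 < pvS al bl C) :
    (PySem.List.pyRange 1 ((al.length : Int) + 1) 1).foldl
      (fun acc l => match acc with | some r => some r | none => pvA_inner al bl l) none
      = some ((al.drop C0).take (pvS al bl C0)) := by
  have hC0len : C0 < al.length := by simp only [pvValid] at hval; omega
  have hs0 : pvS al bl C0 = pvM al bl C0 + 1 := rfl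
  have hfit : C0 + pvS al bl C0 ≤ al.length := by simp only [pvValid] at hval; omega
  rw [pv_foldl_eq_findSome? _ _ (fun l => pvA_inner al bl l) (fun r x => rfl) (fun x => rfl)]
  rw [PySem.List.pyRange_one_append 1 ((pvS al bl C0 : Nat) : Int) ((al.length : Int) + 1)
    (by omega) (by omega)]
  rw [List.findSome?_append]
  rw [List.findSome?_eq_none_iff.mpr ?_]
  · rw [Option.none_or]
    rw [PySem.List.pyRange_one_cons (by omega : ((pvS al bl C0 : Nat) : Int) < (al.length : Int) + 1)]
    rw [List.findSome?_cons]
    rw [pvA_inner_char al bl ((pvS al bl C0 : Nat) : Int) (by omega) (by omega)]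
    rw [PySem.List.pyRange_one_append 0 ((C0 : Nat) : Int)
        ((al.length : Int) - ((pvS al bl C0 : Nat) : Int) + 1) (by omega) (by omega)]
    rw [List.find?_append]
    rw [List.find?_eq_none.mpr ?_]
    · rw [Option.none_or]
      rw [PySem.List.pyRange_one_cons
        (by omega : ((C0 : Nat) : Int) < (al.length : Int) - ((pvS al bl C0 : Nat) : Int) + 1)]
      rw [List.find?_cons_of_pos (by simp)]
      simp
    · intro C hC
      rw [PySem.List.mem_pyRange_one] at hC
      simp only [decide_eq_true_eq, not_le]
      by_contra hsl
      push Not at hsl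
      have hvalid : pvValid al bl C.toNat := by
        simp only [pvValid, pvS] at hsl ⊢
        omega
      have := hstrict C.toNat (by omega) hvalid
      simp only [pvS] at this hsl
      omega
  · intro l hl
    rw [PySem.List.mem_pyRange_one] at hl
    rw [pvA_inner_char al bl l (by omega) (by omega)]
    rw [List.find?_eq_none.mpr ?_]
    · rfl
    · intro C hC
      rw [PySem.List.mem_pyRange_one] at hC
      simp only [decide_eq_true_eq, not_le]
      by_contra hsl
      push Not at hsl
      have hvalid : pvValid al bl C.toNat := by
        simp only [pvValid, pvS] at hsl ⊢
        omega
      have := hmin C.toNat (by simp only [pvValid] at hvalid; omega) hvalid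
      simp only [pvS] at this hsl
      omega

-- ===== VERDICT (by name: the statement is the Claim_ definition above) =====
theorem find_shortest_non_shared_substring_spec : Claim_equal_find_shortest_non_shared_substring := by
  intro a b _
  unfold Spec_find_shortest_non_shared_substring
  show find_shortest_non_shared_substring a b = find_shortest_non_shared_substring_alt a b
  unfold find_shortest_non_shared_substring find_shortest_non_shared_substring_alt
  dsimp only
  rcases pvB_fold_inv a.toList b.toList with ⟨hnone, hall⟩ | ⟨C0, _, hreq, hval, hmin, hstrict⟩
  · rw [hnone, pvA_result_none a.toList b.toList hall]
  · rw [hreq, pvA_result_some a.toList b.toList C0 hval hmin hstrict]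
    dsimp only
    rw [pv_slice_window (by omega) (by omega)]
    simp
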